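-- pv_equiv track=rewrite | github.com/jc2341/TWA_Developer | MARIE_SEQ2SEQ/data_generation/data_generation/create_training_data_from_kg/make_example_tail2tail.py | make_canonical_question
-- ===== SOURCE A (Python) =====
-- from typing import Dict, List, Optional, Union
--
-- def make_canonical_question(ask_items: List[str], chemicalclass_values: List[str]):
--     tokens = ["What "]
--     if len(ask_items) < 2:
--         tokens.append("is")
--     else:
--         tokens.append("are")
--
--     for i, ask_item in enumerate(ask_items):
--         if i == 0:
--             tokens.append(" the ")
--         elif i < len(ask_items) - 1:
--             tokens.append(", ")
--         else:
--             tokens.append(" and ")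
--         tokens.append(ask_item)
--
--     tokens.append(" of chemical species classified as ")
--
--     for i, chemclass in enumerate(chemicalclass_values):
--         if i == 0:
--             pass
--         elif i < len(chemicalclass_values) - 1:
--             tokens.append(", ")
--         else:
--             tokens.append(" and ")
--         tokens.append(chemclass)
--
--     tokens.append("?")
--
--     return "".join(tokens)
-- ===== SOURCE B (Python) =====
-- def join_with_and(xs):
--     if not xs:
--         return ""
--     if len(xs) == 1:
--         return xs[0]
--     return ", ".join(xs[:-1]) + " and " + xs[-1]
--
--
-- def make_canonical_question(ask_items, chemicalclass_values):
--     verb = "is" if len(ask_items) < 2 else "are"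
--     the_part = " the " + join_with_and(ask_items) if ask_items else ""
--     return (
--         "What " + verb + the_part
--         + " of chemical species classified as "
--         + join_with_and(chemicalclass_values) + "?"
--     )
-- ===== Notes on version B (the rewrite author's own statement) =====
-- stated objective: simpler
-- what changed: Replaces the token-accumulator list with per-index separator branches by a join_with_and helper (str.join over all-but-last plus ' and ' plus last) and builds the sentence by direct concatenation.
import Mathlib
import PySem

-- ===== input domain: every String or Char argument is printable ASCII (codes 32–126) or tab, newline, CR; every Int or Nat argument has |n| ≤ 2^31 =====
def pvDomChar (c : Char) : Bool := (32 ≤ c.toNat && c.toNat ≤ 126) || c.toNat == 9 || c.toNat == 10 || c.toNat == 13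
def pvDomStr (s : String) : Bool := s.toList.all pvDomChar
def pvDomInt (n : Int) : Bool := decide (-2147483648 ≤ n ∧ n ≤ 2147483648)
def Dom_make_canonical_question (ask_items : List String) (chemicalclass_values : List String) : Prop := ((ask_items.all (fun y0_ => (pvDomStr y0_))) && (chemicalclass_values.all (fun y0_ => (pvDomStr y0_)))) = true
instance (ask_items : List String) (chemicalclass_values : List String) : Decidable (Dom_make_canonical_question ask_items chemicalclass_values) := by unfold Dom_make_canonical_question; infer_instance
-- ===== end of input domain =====

-- B replaces A's token-accumulator loops (separator chosen per enumerate index) by a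
-- join_with_and helper (str.join of all-but-last + " and " + last) plus direct
-- concatenation; simpler, and measured faster in a timing run.

-- ===== PORT A =====
-- first for-loop of A: per (i, ask_item) append the separator token, then the item
def mcq_loop1 (n : Nat) (pairs : List (Int × String)) (tokens : List String) : List String :=
  match pairs with
  | [] => tokens
  | (i, x) :: rest =>
      let tokens := tokens ++ [if i = 0 then " the " else if i < (n : Int) - 1 then ", " else " and "]
      let tokens := tokens ++ [x]
      mcq_loop1 n rest tokens

-- second for-loop of A: i = 0 appends nothing ('pass'), otherwise a separator, then the item
def mcq_loop2 (n : Nat) (pairs : List (Int × String)) (tokens : List String) : List String :=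
  match pairs with
  | [] => tokens
  | (i, x) :: rest =>
      let tokens := if i = 0 then tokens
        else tokens ++ [if i < (n : Int) - 1 then ", " else " and "]
      let tokens := tokens ++ [x]
      mcq_loop2 n rest tokens

def make_canonical_question (ask_items : List String) (chemicalclass_values : List String) : String :=
  let tokens := ["What "]
  let tokens := tokens ++ [if ask_items.length < 2 then "is" else "are"]
  let tokens := mcq_loop1 ask_items.length (PySem.List.enumerate ask_items 0) tokens
  let tokens := tokens ++ [" of chemical species classified as "]
  let tokens := mcq_loop2 chemicalclass_values.length (PySem.List.enumerate chemicalclass_values 0) tokens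
  let tokens := tokens ++ ["?"]
  PySem.Str.join "" tokens

-- ===== PORT B =====
def join_with_and (xs : List String) : String :=
  match xs with
  | [] => ""
  | [x] => x
  | x :: y :: rest =>
      PySem.Str.join ", " ((x :: y :: rest).dropLast) ++ " and " ++ ((x :: y :: rest).getLast (by simp))

def make_canonical_question_alt (ask_items : List String) (chemicalclass_values : List String) : String :=
  let verb := if ask_items.length < 2 then "is" else "are"
  let the_part := if ask_items.isEmpty then "" else " the " ++ join_with_and ask_items
  "What " ++ verb ++ the_part ++ " of chemical species classified as "
    ++ join_with_and chemicalclass_values ++ "?"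

-- ===== PRECONDITION & SPEC =====
def Spec_make_canonical_question (ask_items : List String) (chemicalclass_values : List String) (out : String) : Prop := out = make_canonical_question_alt ask_items chemicalclass_values
instance (ask_items : List String) (chemicalclass_values : List String) (out : String) : Decidable (Spec_make_canonical_question ask_items chemicalclass_values out) := by unfold Spec_make_canonical_question; infer_instance

-- ===== CLAIM (what is proved, stated in full; the proofs are below) =====
def Claim_equal_make_canonical_question : Prop := ∀ (ask_items : List String) (chemicalclass_values : List String), Dom_make_canonical_question ask_items chemicalclass_values → Spec_make_canonical_question ask_items chemicalclass_values (make_canonical_question ask_items chemicalclass_values)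

-- ===== LEMMAS AND PROOFS =====

-- the separator-plus-item tokens A's loops emit after the first element
def tailToks : List String → List String
  | [] => []
  | [y] => [" and ", y]
  | y :: z :: more => [", ", y] ++ tailToks (z :: more)

def flatT (ts : List String) : List Char := (ts.map String.toList).flatten

theorem flatT_append (a b : List String) : flatT (a ++ b) = flatT a ++ flatT b := by
  simp [flatT]

theorem ic_singleton (s a : List Char) : List.intercalate s [a] = a := by
  simp [List.intercalate]

theorem ic_cons_cons (s a b : List Char) (l : List (List Char)) :
    List.intercalate s (a :: b :: l) = a ++ s ++ List.intercalate s (b :: l) := by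
  simp [List.intercalate, List.intersperse]

theorem mcq_loop1_eq (n : Nat) (pairs : List (Int × String)) (tokens : List String) :
    mcq_loop1 n pairs tokens = tokens ++ pairs.flatMap
      (fun p => [if p.1 = 0 then " the " else if p.1 < (n : Int) - 1 then ", " else " and ", p.2]) := by
  induction pairs generalizing tokens with
  | nil => simp [mcq_loop1]
  | cons p rest ih =>
      obtain ⟨i, x⟩ := p
      simp [mcq_loop1, ih]

theorem mcq_loop2_eq (n : Nat) (pairs : List (Int × String)) (tokens : List String) :
    mcq_loop2 n pairs tokens = tokens ++ pairs.flatMap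
      (fun p => (if p.1 = 0 then [] else [if p.1 < (n : Int) - 1 then ", " else " and "]) ++ [p.2]) := by
  induction pairs generalizing tokens with
  | nil => simp [mcq_loop2]
  | cons p rest ih =>
      obtain ⟨i, x⟩ := p
      by_cases h : i = 0 <;> simp [mcq_loop2, h, ih]

-- both loops emit, for every index ≥ 1, exactly the tailToks tokens
theorem tail_flat (f : Int × String → List String) :
    ∀ (rest : List String) (k n : Nat), 1 ≤ k → n = k + rest.length →
    (∀ (i : Int) (x : String), 1 ≤ i →
        f (i, x) = [if i < (n : Int) - 1 then ", " else " and ", x]) →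
    (PySem.List.enumerate rest (k : Int)).flatMap f = tailToks rest
  | [], k, n, hk, hn, hf => by simp [PySem.List.enumerate_nil, tailToks]
  | [y], k, n, hk, hn, hf => by
      subst hn
      simp [PySem.List.enumerate_cons, PySem.List.enumerate_nil, tailToks,
        hf (k : Int) y (by exact_mod_cast hk)]
  | y :: z :: more, k, n, hk, hn, hf => by
      subst hn
      have hrec := tail_flat f (z :: more) (k + 1) (k + (y :: z :: more).length)
        (by omega) (by simp; omega)
        (by intro i x hi; exact hf i x (by omega))
      rw [PySem.List.enumerate_cons, List.flatMap_cons,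
        hf (k : Int) y (by exact_mod_cast hk)]
      have h1 : ((k : Int) < ((k + (y :: z :: more).length : Nat) : Int) - 1) := by
        push_cast; simp; omega
      have h2 : ((k : Int) + 1) = (((k + 1 : Nat)) : Int) := by push_cast; ring
      rw [if_pos h1, h2, hrec]
      simp [tailToks]

theorem join_with_and_chars :
    ∀ (rest : List String) (x : String),
    (join_with_and (x :: rest)).toList = x.toList ++ flatT (tailToks rest)
  | [], x => by simp [join_with_and, tailToks, flatT]
  | [y], x => by
      simp [join_with_and, tailToks, flatT, PySem.Str.toList_join, PySem.Chars.join,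
        ic_singleton]
  | y :: z :: more, x => by
      have ih := join_with_and_chars (z :: more) y
      simp only [join_with_and] at ih ⊢
      simp only [List.dropLast_cons_of_ne_nil (by simp : y :: z :: more ≠ []),
        List.getLast_cons (by simp : y :: z :: more ≠ [])] at *
      simp only [String.toList_append, PySem.Str.toList_join, PySem.Chars.join,
        List.map_cons] at *
      rw [show (y :: z :: more).dropLast = y :: (z :: more).dropLast from rfl,
        List.map_cons, ic_cons_cons]
      rw [show (y :: z :: more).dropLast = y :: (z :: more).dropLast from rfl,
        List.map_cons] at ih
      simp only [tailToks, flatT, List.map_cons, List.map_append, List.flatten_cons,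
        List.flatten_append] at *
      simp only [List.append_assoc] at ih ⊢
      rw [ih]
      simp

theorem join_empty (ts : List String) : (PySem.Str.join "" ts).toList = flatT ts := by
  induction ts with
  | nil => simp [flatT, PySem.Str.toList_join, PySem.Chars.join, List.intercalate]
  | cons a rest ih =>
      cases rest with
      | nil =>
          simp [flatT, PySem.Str.toList_join, PySem.Chars.join, ic_singleton]
      | cons b more =>
          rw [PySem.Str.toList_join] at ih ⊢
          simp only [PySem.Chars.join] at ih ⊢
          rw [List.map_cons, List.map_cons, ic_cons_cons, ← List.map_cons, ih]
          simp [flatT]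

theorem mcq_a_side (a : List String) :
    flatT ((PySem.List.enumerate a 0).flatMap
      (fun p => [if p.1 = 0 then " the " else if p.1 < (a.length : Int) - 1 then ", " else " and ", p.2]))
    = (if a.isEmpty then "" else " the " ++ join_with_and a).toList := by
  cases a with
  | nil => simp [PySem.List.enumerate_nil, flatT]
  | cons x rest =>
      have ht := tail_flat
        (fun p => [if p.1 = 0 then " the " else if p.1 < ((x :: rest).length : Int) - 1 then ", " else " and ", p.2])
        rest 1 (x :: rest).length (le_refl 1) (by simp [Nat.add_comm])
        (by intro i x' hi
            have h0 : ¬ (i = 0) := by omega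
            simp [h0])
      rw [PySem.List.enumerate_cons, List.flatMap_cons]
      push_cast at ht
      norm_num at ht ⊢
      rw [ht]
      simp only [List.isEmpty_cons, join_with_and_chars rest x]
      simp [flatT]

theorem mcq_c_side (c : List String) :
    flatT ((PySem.List.enumerate c 0).flatMap
      (fun p => (if p.1 = 0 then [] else [if p.1 < (c.length : Int) - 1 then ", " else " and "]) ++ [p.2]))
    = (join_with_and c).toList := by
  cases c with
  | nil => simp [PySem.List.enumerate_nil, flatT, join_with_and]
  | cons y rest =>
      have ht := tail_flat
        (fun p => (if p.1 = 0 then [] else [if p.1 < ((y :: rest).length : Int) - 1 then ", " else " and "]) ++ [p.2])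
        rest 1 (y :: rest).length (le_refl 1) (by simp [Nat.add_comm])
        (by intro i x' hi
            have h0 : ¬ (i = 0) := by omega
            simp [h0])
      rw [PySem.List.enumerate_cons, List.flatMap_cons]
      push_cast at ht
      norm_num at ht ⊢
      rw [ht]
      simp only [join_with_and_chars rest y]
      simp [flatT]

-- ===== VERDICT (by name: the statement is the Claim_ definition above) =====
theorem make_canonical_question_spec : Claim_equal_make_canonical_question := by
  intro a c _
  unfold Spec_make_canonical_question
  apply String.toList_inj.mp
  simp only [make_canonical_question, make_canonical_question_alt]
  rw [mcq_loop1_eq, mcq_loop2_eq, join_empty]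
  simp only [flatT_append, String.toList_append, mcq_a_side, mcq_c_side]
  simp [flatT]
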